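-- pv_equiv track=rewrite | github.com/sshworld/algorithm | algospot/7_2.py | find
-- ===== SOURCE A (Python) =====
-- def find(tree, index) :
--
--     if(index >= len(tree)) :
--         return ""
--
--     charPoint = tree[index]
--
--     if(charPoint == 'w') :
--         return 'w'
--
--     if(charPoint == 'b') :
--         return 'b'
--
--     index += 1
--     lt = find(tree, index)
--
--     index += len(lt)
--     rt = find(tree, index)
--
--     index += len(rt)
--     lb = find(tree, index)
--
--     index += len(lb)
--     rb = find(tree, index)
--
--     return "x" + lb + rb + lt + rt
-- ===== SOURCE B (Python) =====
-- def find(tree, index):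
--     node, _ = _parse(tree, index)
--     return _serialize(node)
--
--
-- def _parse(tree, i):
--     """Parse the node starting at position i; return (node, chars consumed)."""
--     if i >= len(tree):
--         return None, 0
--     c = tree[i]
--     if c == 'w' or c == 'b':
--         return c, 1
--     lt, n1 = _parse(tree, i + 1)
--     rt, n2 = _parse(tree, i + 1 + n1)
--     lb, n3 = _parse(tree, i + 1 + n1 + n2)
--     rb, n4 = _parse(tree, i + 1 + n1 + n2 + n3)
--     return ('x', lt, rt, lb, rb), 1 + n1 + n2 + n3 + n4
--
--
-- def _serialize(node):
--     if node is None: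
--         return ""
--     if isinstance(node, str):
--         return node
--     _, lt, rt, lb, rb = node
--     return "x" + _serialize(lb) + _serialize(rb) + _serialize(lt) + _serialize(rt)
-- ===== Notes on version B (the rewrite author's own statement) =====
-- stated objective: alternative
-- what changed: Replaces A's single index-threaded recursion that concatenates the swapped output directly with a two-phase build-then-traverse design: a parser builds an explicit quadtree (returning the node and its consumed length), and a separate serializer walks the tree emitting bottom halves before top halves.
import Mathlib
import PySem

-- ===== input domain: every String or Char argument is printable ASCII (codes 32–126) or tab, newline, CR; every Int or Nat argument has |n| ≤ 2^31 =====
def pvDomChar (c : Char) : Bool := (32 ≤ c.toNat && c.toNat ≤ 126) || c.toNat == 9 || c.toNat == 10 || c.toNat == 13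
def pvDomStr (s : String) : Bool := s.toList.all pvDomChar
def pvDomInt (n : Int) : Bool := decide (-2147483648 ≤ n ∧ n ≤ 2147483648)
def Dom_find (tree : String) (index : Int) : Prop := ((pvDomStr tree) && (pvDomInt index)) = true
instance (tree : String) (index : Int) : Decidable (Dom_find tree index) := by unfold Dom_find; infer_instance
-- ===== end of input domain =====

-- B re-implements the decode-and-swap as a two-phase build-then-traverse (parse to an
-- explicit quadtree, then serialize it swapped) instead of A's single index-threaded
-- recursion that builds the output string directly; same values, similar cost.

-- ===== PORT A =====
-- worker on List Char (string ops are ported on the code-point list side, per PySem);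
-- the fuel argument is a totality guard only: each nested call strictly increases i,
-- so fuel (len - i).toNat + 1 is never exhausted.
def findChars : Nat → List Char → Int → List Char
  | 0, _, _ => []
  | fuel+1, cs, i =>
    if (cs.length : Int) ≤ i then []
    else
      match PySem.List.pyGet? cs i with
      | none => []   -- tree[index] raises IndexError in Python here; excluded by Pre_find
      | some c =>
        if c = 'w' then ['w']
        else if c = 'b' then ['b']
        else
          let lt := findChars fuel cs (i+1)
          let rt := findChars fuel cs (i+1+(lt.length:Int))
          let lb := findChars fuel cs (i+1+(lt.length:Int)+(rt.length:Int))
          let rb := findChars fuel cs (i+1+(lt.length:Int)+(rt.length:Int)+(lb.length:Int))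
          'x' :: (lb ++ rb ++ (lt ++ rt))

def find (tree : String) (index : Int) : String :=
  String.ofList (findChars (((tree.toList.length : Int) - index).toNat + 1) tree.toList index)

-- ===== PORT B =====
-- explicit quadtree built by the parse phase
inductive QT : Type where
  | empty : QT
  | leaf : Char → QT
  | node : QT → QT → QT → QT → QT
deriving DecidableEq, Repr

-- phase 1: parse the node at position i, returning (node, number of chars consumed);
-- same fuel totality guard as above (each nested call strictly increases i)
def parseC : Nat → List Char → Int → QT × Nat
  | 0, _, _ => (QT.empty, 0)
  | fuel+1, cs, i =>
    if (cs.length : Int) ≤ i then (QT.empty, 0)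
    else
      match PySem.List.pyGet? cs i with
      | none => (QT.empty, 0)   -- tree[i] raises IndexError in Python here; excluded by Pre_find
      | some c =>
        if c = 'w' ∨ c = 'b' then (QT.leaf c, 1)
        else
          let p1 := parseC fuel cs (i+1)
          let p2 := parseC fuel cs (i+1+(p1.2:Int))
          let p3 := parseC fuel cs (i+1+(p1.2:Int)+(p2.2:Int))
          let p4 := parseC fuel cs (i+1+(p1.2:Int)+(p2.2:Int)+(p3.2:Int))
          (QT.node p1.1 p2.1 p3.1 p4.1, 1+p1.2+p2.2+p3.2+p4.2)

-- phase 2: serialize with the top/bottom halves swapped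
def serC : QT → List Char
  | .empty => []
  | .leaf c => [c]
  | .node lt rt lb rb => 'x' :: (serC lb ++ serC rb ++ (serC lt ++ serC rt))

def find_alt (tree : String) (index : Int) : String :=
  String.ofList (serC (parseC (((tree.toList.length : Int) - index).toNat + 1) tree.toList index).1)

-- ===== PRECONDITION & SPEC =====
-- Pre_ excludes exactly the inputs (index < -len(tree)) on which Python's tree[index]
-- raises IndexError in both A and B.
def Pre_find (tree : String) (index : Int) : Prop := -(PySem.Str.len tree) ≤ index
instance (tree : String) (index : Int) : Decidable (Pre_find tree index) := by unfold Pre_find; infer_instance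
def pvWitness_find : String × Int := ("xwxbwwbb", 0)

def Spec_find (tree : String) (index : Int) (out : String) : Prop := out = find_alt tree index
instance (tree : String) (index : Int) (out : String) : Decidable (Spec_find tree index out) := by unfold Spec_find; infer_instance

-- ===== CLAIM (what is proved, stated in full; the proofs are below) =====
def Claim_equal_find : Prop := ∀ (tree : String) (index : Int), Dom_find tree index → Pre_find tree index → Spec_find tree index (find tree index)

-- ===== LEMMAS AND PROOFS =====

-- A's direct decoding equals B's parse-then-serialize, and A's output length is
-- B's consumed count — at every fuel, so the common fuel value cancels.
lemma findChars_eq_parse : ∀ (fuel : Nat) (cs : List Char) (i : Int),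
    findChars fuel cs i = serC (parseC fuel cs i).1 ∧
    (findChars fuel cs i).length = (parseC fuel cs i).2 := by
  intro fuel
  induction fuel with
  | zero => intro cs i; simp [findChars, parseC, serC]
  | succ fuel ih =>
    intro cs i
    rw [findChars, parseC]
    by_cases hge : (cs.length : Int) ≤ i
    · simp [hge, serC]
    · simp only [if_neg hge]
      cases hget : PySem.List.pyGet? cs i with
      | none => simp [serC]
      | some c =>
        by_cases hw : c = 'w'
        · simp [hw, serC]
        · by_cases hb : c = 'b'
          · simp [hb, serC]
          · have hwb : ¬ (c = 'w' ∨ c = 'b') := by tauto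
            simp only [if_neg hw, if_neg hb, if_neg hwb]
            obtain ⟨e1, l1⟩ := ih cs (i+1)
            rw [l1]
            obtain ⟨e2, l2⟩ := ih cs (i+1+((parseC fuel cs (i+1)).2:Int))
            rw [l2]
            obtain ⟨e3, l3⟩ := ih cs
              (i+1+((parseC fuel cs (i+1)).2:Int)+(((parseC fuel cs (i+1+((parseC fuel cs (i+1)).2:Int))).2:Int)))
            rw [l3]
            obtain ⟨e4, l4⟩ := ih cs
              (i+1+((parseC fuel cs (i+1)).2:Int)+(((parseC fuel cs (i+1+((parseC fuel cs (i+1)).2:Int))).2:Int))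
               +(((parseC fuel cs (i+1+((parseC fuel cs (i+1)).2:Int)+(((parseC fuel cs (i+1+((parseC fuel cs (i+1)).2:Int))).2:Int)))).2:Int)))
            constructor
            · rw [e1, e2, e3, e4]; simp [serC]
            · simp only [List.length_cons, List.length_append]
              omega

-- ===== VERDICT (by name: the statement is the Claim_ definition above) =====
theorem find_spec : Claim_equal_find := by
  intro tree index _ _
  unfold Spec_find find find_alt
  exact congrArg String.ofList
    (findChars_eq_parse (((tree.toList.length : Int) - index).toNat + 1) tree.toList index).1
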